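-- pv_equiv track=rewrite | github.com/Matt-Barthet/Affectively-Framework | utils/level_process.py | arr_to_str
-- ===== SOURCE A (Python) =====
-- phareser = ['X', 'S', '-', '?', 'Q', 'E', '<', '>', '[', ']', 'o']
--
-- def arr_to_str(level):
--     height = len(level)
--     width = len(level[0])
--     str = ''
--     for i in range(height):
--         for j in range(width):
--             str += phareser[level[i][j]]
--         if i < height - 1:
--             str += '\n'
--     return str
-- ===== SOURCE B (Python) =====
-- phareser = ['X', 'S', '-', '?', 'Q', 'E', '<', '>', '[', ']', 'o']
--
-- def arr_to_str(level):
--     w = len(level[0])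
--     n = len(level) * (w + 1) - 1
--     return ''.join(
--         '\n' if k % (w + 1) == w else phareser[level[k // (w + 1)][k % (w + 1)]]
--         for k in range(n))
-- ===== Notes on version B (the rewrite author's own statement) =====
-- stated objective: alternative
-- what changed: Replaces A's nested row/column loops with conditional trailing-newline bookkeeping by a single flat pass over output positions 0..h*(w+1)-2, computing each character from index arithmetic: position k is a newline iff k % (w+1) == w, else the tile at row k//(w+1), column k%(w+1).
import Mathlib
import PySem

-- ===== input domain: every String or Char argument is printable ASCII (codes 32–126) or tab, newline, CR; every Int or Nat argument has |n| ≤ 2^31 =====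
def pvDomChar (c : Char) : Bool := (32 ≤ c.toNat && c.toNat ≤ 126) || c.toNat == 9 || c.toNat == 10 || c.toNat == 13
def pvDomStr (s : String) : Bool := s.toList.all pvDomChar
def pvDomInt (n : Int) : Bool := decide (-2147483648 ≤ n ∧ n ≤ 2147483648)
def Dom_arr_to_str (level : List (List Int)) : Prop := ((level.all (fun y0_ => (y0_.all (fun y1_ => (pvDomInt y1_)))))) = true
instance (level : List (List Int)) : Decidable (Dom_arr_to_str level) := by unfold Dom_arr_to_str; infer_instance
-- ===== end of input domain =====

-- B replaces A's nested row/column loops and conditional trailing newline by a single flat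
-- pass over output positions with index arithmetic (k % (w+1), k // (w+1)) (objective: alternative).

-- ===== PORT A =====
def pvPhareser : List String := ["X", "S", "-", "?", "Q", "E", "<", ">", "[", "]", "o"]

def arr_to_str (level : List (List Int)) : String :=
  let height : Int := level.length
  let width : Int := (((PySem.List.pyGet? level 0).getD []).length : Int)
  String.ofList
    ((PySem.List.pyRange 0 height 1).foldl (fun s i =>
      let s2 := (PySem.List.pyRange 0 width 1).foldl (fun s j =>
        s ++ ((PySem.List.pyGet? pvPhareser
                (PySem.List.pyGetD (PySem.List.pyGetD level i []) j 0)).getD "").toList) s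
      if i < height - 1 then s2 ++ ['\n'] else s2) [])

-- ===== PORT B =====
def arr_to_str_alt (level : List (List Int)) : String :=
  let w : Int := (((PySem.List.pyGet? level 0).getD []).length : Int)
  let n : Int := (level.length : Int) * (w + 1) - 1
  String.ofList
    (((PySem.List.pyRange 0 n 1).map (fun k =>
        if PySem.Int.mod k (w + 1) = w then ['\n']
        else ((PySem.List.pyGet? pvPhareser
                (PySem.List.pyGetD
                  (PySem.List.pyGetD level (PySem.Int.floordiv k (w + 1)) [])
                  (PySem.Int.mod k (w + 1)) 0)).getD "").toList)).flatten)

-- ===== PRECONDITION & SPEC =====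
-- Pre_ excludes exactly the inputs where Python A raises IndexError: the empty level
-- (len(level[0])), a row shorter than the first row, or a tile value outside -11..10
-- (phareser has 11 entries, negative indices wrap).
def Pre_arr_to_str (level : List (List Int)) : Prop :=
  level ≠ [] ∧ ∀ row ∈ level,
    (level.headD []).length ≤ row.length ∧
    ∀ v ∈ row.take (level.headD []).length, -11 ≤ v ∧ v ≤ 10
instance (level : List (List Int)) : Decidable (Pre_arr_to_str level) := by
  unfold Pre_arr_to_str; infer_instance

def pvWitness_arr_to_str : List (List Int) := [[0, 1, -1], [2, 10, 3]]

def Spec_arr_to_str (level : List (List Int)) (out : String) : Prop := out = arr_to_str_alt level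
instance (level : List (List Int)) (out : String) : Decidable (Spec_arr_to_str level out) := by
  unfold Spec_arr_to_str; infer_instance

-- ===== CLAIM (what is proved, stated in full; the proofs are below) =====
def Claim_equal_arr_to_str : Prop := ∀ (level : List (List Int)),
  Dom_arr_to_str level → Pre_arr_to_str level → Spec_arr_to_str level (arr_to_str level)

-- ===== LEMMAS AND PROOFS =====

-- the character(s) Python's `phareser[v]` contributes, as a list of chars
def pvTile (v : Int) : List Char := ((PySem.List.pyGet? pvPhareser v).getD "").toList

-- one rendered row (the common normal form both ports are reduced to)
def pvRowC (w : Nat) (row : List Int) : List Char := ((row.take w).map pvTile).flatten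

lemma pv_get0 {α : Type} (xs : List α) (d : α) (h : xs ≠ []) :
    (PySem.List.pyGet? xs 0).getD d = xs.headD d := by
  cases xs with
  | nil => simp at h
  | cons a t => simp [pysem]

-- a row's tiles, indexed form = take form
lemma pv_row_range (w : Nat) (row : List Int) (hw : w ≤ row.length) :
    (List.range w).map (fun k => pvTile (row.getD k 0)) = (row.take w).map pvTile := by
  apply List.ext_getElem
  · simp [Nat.min_eq_left hw]
  · intro k h1 h2
    simp only [List.getElem_map, List.getElem_range, List.getElem_take]
    rw [List.getD_eq_getElem _ _ (by simp at h1; omega)]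

-- A's inner loop over j in range(width) writes the tiles of row.take w
lemma pv_inner (row : List Int) (w : Nat) (hw : w ≤ row.length) (s : List Char) :
    (PySem.List.pyRange 0 (w : Int) 1).foldl
      (fun s j => s ++ pvTile (PySem.List.pyGetD row j 0)) s
    = s ++ ((row.take w).map pvTile).flatten := by
  induction w generalizing s with
  | zero => simp [PySem.List.pyRange_one_eq_nil]
  | succ n ih =>
    have hn : n < row.length := by omega
    have hcast : ((n + 1 : Nat) : Int) = (n : Int) + 1 := by push_cast; ring
    rw [hcast, PySem.List.pyRange_one_succ_right (by positivity), List.foldl_append,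
      ih (by omega)]
    simp only [List.foldl_cons, List.foldl_nil]
    rw [PySem.List.pyGetD_natCast, List.getD_eq_getElem _ _ hn]
    rw [List.take_add_one]
    simp [List.getElem?_eq_getElem hn, List.append_assoc]
    rw [List.take_add_one]
    simp [List.getElem?_map, List.getElem?_eq_getElem hn]

-- flatMap with a trailing newline, then the last row, is exactly '\n'.join
lemma pv_join (l : List (List Char)) (z : List Char) :
    (l.flatMap (fun x => x ++ ['\n'])) ++ z = PySem.Chars.join ['\n'] (l ++ [z]) := by
  induction l with
  | nil => simp [PySem.Chars.join_singleton]
  | cons a l ih =>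
    cases hl : l ++ [z] with
    | nil => simp at hl
    | cons q rest =>
      rw [List.cons_append, hl, PySem.Chars.join_cons_cons, ← hl, ← ih]
      simp

-- A's outer loop over the last-row decomposition
lemma pv_outer (f : List Int → List Char) (ys : List (List Int)) (z : List Int) :
    ((PySem.List.pyRange 0 ((ys.length : Int) + 1) 1).foldl
      (fun s i =>
        if i < (ys.length : Int) + 1 - 1
        then (s ++ f (PySem.List.pyGetD (ys ++ [z]) i [])) ++ ['\n']
        else s ++ f (PySem.List.pyGetD (ys ++ [z]) i []))
      [])
    = PySem.Chars.join ['\n'] ((ys ++ [z]).map f) := by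
  rw [PySem.List.pyRange_one_succ_right (by positivity), List.foldl_append]
  simp only [List.foldl_cons, List.foldl_nil]
  have hlast : PySem.List.pyGetD (ys ++ [z]) ((ys.length : Int)) [] = z := by
    rw [PySem.List.pyGetD_natCast]
    simp [List.getD_eq_getElem?_getD]
  have hbody : (PySem.List.pyRange 0 ((ys.length : Int)) 1).foldl
      (fun s i =>
        if i < (ys.length : Int) + 1 - 1
        then (s ++ f (PySem.List.pyGetD (ys ++ [z]) i [])) ++ ['\n']
        else s ++ f (PySem.List.pyGetD (ys ++ [z]) i []))
      []
      = (PySem.List.pyRange 0 ((ys.length : Int)) 1).foldl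
      (fun s i => s ++ (f (PySem.List.pyGetD ys i []) ++ ['\n'])) [] := by
    apply PySem.List.foldl_congr_mem
    intro acc x hx
    rw [PySem.List.mem_pyRange_one] at hx
    have hx' : x < (ys.length : Int) := hx.2
    rw [if_pos (by omega)]
    rw [PySem.List.pyGetD_eq_getElem _ _ hx.1 (by simp; omega),
      PySem.List.pyGetD_eq_getElem _ _ hx.1 (by exact_mod_cast hx'),
      List.getElem_append_left (by omega)]
    simp
  rw [hbody]
  have := PySem.List.foldl_pyRange_zero_pyGetD ys ([] : List Int)
      (fun s row => s ++ (f row ++ ['\n'])) ([] : List Char)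
  simp only [PySem.List.len_eq] at this
  rw [this, PySem.List.foldl_append_eq_flatMap (fun row => f row ++ ['\n']) ys []]
  rw [hlast, List.map_append, List.map_singleton, ← pv_join (ys.map f) (f z),
    List.flatMap_map]
  rw [if_neg (by omega)]
  simp

-- A equals the '\n'-join of the rendered rows
lemma pv_A_eq_join (level : List (List Int)) (hne : level ≠ [])
    (hw : ∀ row ∈ level, (level.headD []).length ≤ row.length) :
    arr_to_str level =
      String.ofList (PySem.Chars.join ['\n']
        (level.map (pvRowC (level.headD []).length))) := by
  obtain ⟨ys, z, heq⟩ := (List.eq_nil_or_concat level).resolve_left hne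
  rw [List.concat_eq_append] at heq
  subst heq
  unfold arr_to_str
  rw [pv_get0 _ _ hne]
  set w : Nat := ((ys ++ [z]).headD []).length with hwdef
  apply congrArg String.ofList
  have hin : (PySem.List.pyRange 0 (((ys ++ [z]).length : Nat) : Int) 1).foldl
      (fun s i =>
        let s2 := (PySem.List.pyRange 0 (w : Int) 1).foldl
          (fun s j => s ++ pvTile (PySem.List.pyGetD (PySem.List.pyGetD (ys ++ [z]) i []) j 0)) s
        if i < (((ys ++ [z]).length : Nat) : Int) - 1 then s2 ++ ['\n'] else s2) []
      = (PySem.List.pyRange 0 (((ys ++ [z]).length : Nat) : Int) 1).foldl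
      (fun s i =>
        if i < (((ys ++ [z]).length : Nat) : Int) - 1
        then (s ++ pvRowC w (PySem.List.pyGetD (ys ++ [z]) i [])) ++ ['\n']
        else s ++ pvRowC w (PySem.List.pyGetD (ys ++ [z]) i [])) [] := by
    apply PySem.List.foldl_congr_mem
    intro acc x hx
    rw [PySem.List.mem_pyRange_one] at hx
    have hmem : PySem.List.pyGetD (ys ++ [z]) x [] ∈ ys ++ [z] :=
      PySem.List.pyGetD_mem _ _ ⟨by omega, hx.2⟩
    rw [pv_inner _ _ (hw _ hmem) acc]
    rfl
  simp only [pvTile] at hin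
  rw [hin]
  have hlen : (((ys ++ [z]).length : Nat) : Int) = (ys.length : Int) + 1 := by simp
  rw [hlen]
  exact pv_outer (pvRowC w) ys z

-- B's flat positional pass, in Nat form, equals the '\n'-join of the rendered rows
lemma pv_posB (w : Nat) (rows : List (List Int)) (hne : rows ≠ [])
    (hw : ∀ row ∈ rows, w ≤ row.length) :
    ((List.range (rows.length * (w + 1) - 1)).map (fun k =>
        if k % (w + 1) = w then ['\n']
        else pvTile ((rows.getD (k / (w + 1)) []).getD (k % (w + 1)) 0))).flatten
    = PySem.Chars.join ['\n'] (rows.map (pvRowC w)) := by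
  induction rows with
  | nil => simp at hne
  | cons r rest ih =>
    have hr : w ≤ r.length := hw r (by simp)
    have hrow : ∀ k < w,
        (if k % (w + 1) = w then ['\n']
         else pvTile (((r :: rest).getD (k / (w + 1)) []).getD (k % (w + 1)) 0))
        = pvTile (r.getD k 0) := by
      intro k hk
      have h1 : k % (w + 1) = k := Nat.mod_eq_of_lt (by omega)
      have h2 : k / (w + 1) = 0 := Nat.div_eq_of_lt (by omega)
      rw [h1, h2, if_neg (by omega)]
      rfl
    cases rest with
    | nil =>
      simp only [List.length_cons, List.length_nil]
      have hN : (0 + 1) * (w + 1) - 1 = w := by omega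
      rw [hN, List.map_congr_left (fun k hk => hrow k (List.mem_range.mp hk)),
        pv_row_range w r hr]
      simp [PySem.Chars.join_singleton, pvRowC]
    | cons q rest' =>
      have hne' : q :: rest' ≠ [] := by simp
      have hw' : ∀ row ∈ q :: rest', w ≤ row.length := fun row h => hw row (by simp [h])
      have hP : 0 < (q :: rest').length * (w + 1) :=
        Nat.mul_pos (by simp) (by omega)
      have hN : (r :: q :: rest').length * (w + 1) - 1
          = (w + 1) + ((q :: rest').length * (w + 1) - 1) := by
        simp only [List.length_cons] at *
        have : ((q :: rest').length + 1) * (w + 1)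
            = (q :: rest').length * (w + 1) + (w + 1) := by ring
        simp only [List.length_cons] at this
        omega
      rw [hN, List.range_add, List.map_append, List.flatten_append, List.map_map]
      have hshift : ∀ k : Nat,
          ((fun k =>
              if k % (w + 1) = w then ['\n']
              else pvTile (((r :: q :: rest').getD (k / (w + 1)) []).getD (k % (w + 1)) 0))
            ∘ (fun x => (w + 1) + x)) k
          = (fun k =>
              if k % (w + 1) = w then ['\n']
              else pvTile (((q :: rest').getD (k / (w + 1)) []).getD (k % (w + 1)) 0)) k := by
        intro k
        simp only [Function.comp]
        rw [Nat.add_mod_left, Nat.add_comm (w + 1) k, Nat.add_div_right _ (by omega)]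
        rfl
      rw [List.map_congr_left (fun k _ => hshift k), ih hne' hw']
      have hfirst : List.range (w + 1) = List.range w ++ [w] := List.range_succ
      rw [hfirst, List.map_append, List.flatten_append,
        List.map_congr_left (fun k hk => hrow k (List.mem_range.mp hk)),
        pv_row_range w r hr]
      have hwn : (if w % (w + 1) = w then ['\n']
          else pvTile (((r :: q :: rest').getD (w / (w + 1)) []).getD (w % (w + 1)) 0))
          = ['\n'] := by rw [if_pos (Nat.mod_eq_of_lt (by omega))]
      simp only [List.map_cons, List.map_nil, hwn]
      rw [PySem.Chars.join_cons_cons]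
      simp [pvRowC]

-- B equals the same join
lemma pv_B_eq_join (level : List (List Int)) (hne : level ≠ [])
    (hw : ∀ row ∈ level, (level.headD []).length ≤ row.length) :
    arr_to_str_alt level =
      String.ofList (PySem.Chars.join ['\n']
        (level.map (pvRowC (level.headD []).length))) := by
  unfold arr_to_str_alt
  rw [pv_get0 _ _ hne]
  set w : Nat := (level.headD []).length with hwdef
  apply congrArg String.ofList
  have hL : 1 ≤ level.length := by
    cases level with | nil => simp at hne | cons a t => simp
  have hn : ((level.length : Int) * ((w : Int) + 1) - 1 - 0).toNat
      = level.length * (w + 1) - 1 := by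
    have : (level.length : Int) * ((w : Int) + 1) = ((level.length * (w + 1) : Nat) : Int) := by
      push_cast; ring
    rw [this]; omega
  rw [PySem.List.pyRange_one, hn, List.map_map]
  have hel : ∀ k : Nat,
      ((fun k : Int =>
          if PySem.Int.mod k ((w : Int) + 1) = (w : Int) then ['\n']
          else ((PySem.List.pyGet? pvPhareser
            (PySem.List.pyGetD
              (PySem.List.pyGetD level (PySem.Int.floordiv k ((w : Int) + 1)) [])
              (PySem.Int.mod k ((w : Int) + 1)) 0)).getD "").toList)
        ∘ (fun k : Nat => (0 : Int) + (k : Int))) k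
      = (fun k : Nat =>
          if k % (w + 1) = w then ['\n']
          else pvTile ((level.getD (k / (w + 1)) []).getD (k % (w + 1)) 0)) k := by
    intro k
    simp only [Function.comp, zero_add]
    have hc : ((w : Int) + 1) = ((w + 1 : Nat) : Int) := by push_cast; ring
    simp only [hc, PySem.Int.mod_natCast, PySem.Int.floordiv_natCast,
      PySem.List.pyGetD_natCast, Nat.cast_inj]
    rfl
  rw [List.map_congr_left (fun k _ => hel k)]
  exact pv_posB w level hne hw

-- ===== VERDICT (by name: the statement is the Claim_ definition above) =====
theorem arr_to_str_spec : Claim_equal_arr_to_str := by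
  intro level _ hpre
  obtain ⟨hne, hrows⟩ := hpre
  have hw : ∀ row ∈ level, (level.headD []).length ≤ row.length :=
    fun row hr => (hrows row hr).1
  unfold Spec_arr_to_str
  rw [pv_A_eq_join level hne hw, pv_B_eq_join level hne hw]
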